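-- pv_equiv track=rewrite | github.com/rrader/ADCS | routing/route.py | count_zones
-- ===== SOURCE A (Python) =====
-- from copy import deepcopy
--
-- def count_zones(value, patterns):
--     patterns = deepcopy(patterns)
--     found = True
--     count = 0
--
--     def fill_zone(i, j, z):
--         if i < 0 or j < 0 or z < 0: return
--         try:
--             if patterns[z][j][i] == value:
--                 patterns[z][j][i] = 0
--                 fill_zone(i + 1, j, z)
--                 fill_zone(i - 1, j, z)
--                 fill_zone(i, j + 1, z)
--                 fill_zone(i, j - 1, z)
--                 fill_zone(i, j, z + 1)
--                 fill_zone(i, j, z - 1)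
--         except IndexError:
--             pass
--
--     while found:
--         found = False
--         for z, pattern in enumerate(patterns):
--             for j, line in enumerate(pattern):
--                 for i, cell in enumerate(line):
--                     if cell == value:
--                         fill_zone(i, j, z)
--                         count += 1
--                         found = True
--                         break
--     return count
-- ===== SOURCE B (Python) =====
-- def count_zones(value, patterns):
--     # Single-pass flood fill: scan each cell once; on a matching cell, count the
--     # zone and zero it out with an explicit-stack fill (no re-sweeping, no recursion).
--     grid = [[list(row) for row in layer] for layer in patterns]
--     count = 0
--     for z in range(len(grid)):
--         for j in range(len(grid[z])):
--             for i in range(len(grid[z][j])):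
--                 if grid[z][j][i] == value:
--                     count += 1
--                     stack = [(i, j, z)]
--                     while stack:
--                         x, y, w = stack.pop()
--                         if (0 <= w < len(grid) and 0 <= y < len(grid[w])
--                                 and 0 <= x < len(grid[w][y]) and grid[w][y][x] == value):
--                             grid[w][y][x] = 0
--                             stack.extend(((x + 1, y, w), (x - 1, y, w), (x, y + 1, w),
--                                           (x, y - 1, w), (x, y, w + 1), (x, y, w - 1)))
--     return count
-- ===== Notes on version B (the rewrite author's own statement) =====
-- stated objective: faster
-- what changed: A repeatedly re-sweeps the whole grid (restarting after each per-row fill, with a found flag) and flood-fills by deep recursion; B makes one single pass over the cells and flood-fills each still-matching cell with an explicit stack, so every cell is scanned once and no re-sweeps or recursion occur.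
import Mathlib
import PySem

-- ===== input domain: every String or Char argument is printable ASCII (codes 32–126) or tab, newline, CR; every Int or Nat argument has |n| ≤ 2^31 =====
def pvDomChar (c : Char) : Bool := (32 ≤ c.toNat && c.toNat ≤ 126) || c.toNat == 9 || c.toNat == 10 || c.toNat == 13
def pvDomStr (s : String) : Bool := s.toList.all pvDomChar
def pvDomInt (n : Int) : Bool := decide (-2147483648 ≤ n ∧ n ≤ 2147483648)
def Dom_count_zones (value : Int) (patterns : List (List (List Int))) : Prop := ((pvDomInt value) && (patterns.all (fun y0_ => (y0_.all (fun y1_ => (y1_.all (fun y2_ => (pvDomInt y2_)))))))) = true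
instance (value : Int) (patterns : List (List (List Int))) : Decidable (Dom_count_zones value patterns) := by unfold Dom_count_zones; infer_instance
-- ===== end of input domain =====

-- B replaces A's repeated full re-sweeps with recursive flood fill by a single scan with an
-- explicit-stack flood fill (objective: faster single-pass traversal; A mutates only its own
-- deepcopy, so the return value is all a caller observes).


-- ===== PORT A =====

-- `patterns[z][j][i]` for 0 ≤ i,j,z; `none` = IndexError (A catches it with `except: pass`).
-- Every use is behind A's `i < 0 or j < 0 or z < 0` guard (B checks `0 <= ...` explicitly),
-- where Python indexing at a non-negative index is plain indexing.
def cellAt (g : List (List (List Int))) (i j z : Int) : Option Int :=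
  if 0 ≤ i ∧ 0 ≤ j ∧ 0 ≤ z then
    g[z.toNat]?.bind fun layer => layer[j.toNat]?.bind fun row => row[i.toNat]?
  else none

-- `patterns[z][j][i] = 0` (only invoked at indices that were just read successfully)
def set0 (g : List (List (List Int))) (i j z : Int) : List (List (List Int)) :=
  g.modify z.toNat (fun layer => layer.modify j.toNat (fun row => row.set i.toNat 0))

-- A's recursive `fill_zone`; fuel models Python's call stack (the callers pass enough fuel
-- for the recursion to run to completion exactly as in Python).
def fillA (value : Int) : Nat → Int → Int → Int → List (List (List Int)) → List (List (List Int))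
  | 0, _, _, _, g => g
  | fuel+1, i, j, z, g =>
    if i < 0 ∨ j < 0 ∨ z < 0 then g
    else
      match cellAt g i j z with
      | none => g          -- IndexError: pass
      | some cell =>
        if cell = value then
          let g1 := set0 g i j z
          let g2 := fillA value fuel (i+1) j z g1
          let g3 := fillA value fuel (i-1) j z g2
          let g4 := fillA value fuel i (j+1) z g3
          let g5 := fillA value fuel i (j-1) z g4
          let g6 := fillA value fuel i j (z+1) g5
          fillA value fuel i j (z-1) g6
        else g

def totalCells (g : List (List (List Int))) : Nat :=
  (g.map (fun layer => (layer.map List.length).sum)).sum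

def rowAt (g : List (List (List Int))) (z j : Nat) : List Int := (g.getD z []).getD j []

-- one row of A's sweep: `for i, cell in enumerate(line): if cell == value: fill; count += 1; break`
def sweepRow (value : Int) (st : List (List (List Int)) × Int × Bool) (zj : Nat × Nat) :
    List (List (List Int)) × Int × Bool :=
  match (rowAt st.1 zj.1 zj.2).findIdx? (· = value) with
  | none => st
  | some i => (fillA value (totalCells st.1 + 1) (i : Int) (zj.2 : Int) (zj.1 : Int) st.1,
               st.2.1 + 1, true)

-- the (z, j) pairs enumerated by A's two outer `for` loops (the fills never change the shape)
def pairsOf (g : List (List (List Int))) : List (Nat × Nat) :=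
  (List.range g.length).flatMap (fun z => (List.range (g.getD z []).length).map (fun j => (z, j)))

-- `while found:` — each iteration that sets `found` zeroes at least one matching cell,
-- so `totalCells + 2` iterations are always enough fuel for the loop to finish as in Python.
def loopA (value : Int) : Nat → List (List (List Int)) → Int → Int
  | 0, _, c => c
  | fuel+1, g, c =>
    match (pairsOf g).foldl (sweepRow value) (g, 0, false) with
    | (g', dc, found) => if found then loopA value fuel g' (c + dc) else c

def count_zones (value : Int) (patterns : List (List (List Int))) : Int :=
  loopA value (totalCells patterns + 2) patterns 0

-- ===== PORT B =====

-- B's `while stack:` loop; Python pops from the end of the list, so the head of this list is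
-- the top of the stack and the six pushed neighbours appear here in reverse push order.
-- B's test `0 <= w < len(grid) and 0 <= y < ... and 0 <= x < ... and grid[w][y][x] == value`
-- is exactly `cellAt g x y w = some value`.  Fuel: each iteration pops one entry and pushes
-- six only when it zeroes a matching cell, so the callers' fuel is always enough.
def fillB (value : Int) : Nat → List (Int × Int × Int) → List (List (List Int)) → List (List (List Int))
  | 0, _, g => g
  | _+1, [], g => g
  | fuel+1, (x, y, w) :: s, g =>
    if cellAt g x y w = some value then
      fillB value fuel
        ((x, y, w-1) :: (x, y, w+1) :: (x, y-1, w) :: (x, y+1, w) :: (x-1, y, w) :: (x+1, y, w) :: s)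
        (set0 g x y w)
    else fillB value fuel s g

-- the (i, j, z) triples visited by B's single scan, in scan order
def positionsOf (g : List (List (List Int))) : List (Int × Int × Int) :=
  (List.range g.length).flatMap fun z =>
    (List.range (g.getD z []).length).flatMap fun j =>
      (List.range (rowAt g z j).length).map fun i => ((i : Int), (j : Int), (z : Int))

def scanStep (value : Int) (st : List (List (List Int)) × Int) (p : Int × Int × Int) :
    List (List (List Int)) × Int :=
  if cellAt st.1 p.1 p.2.1 p.2.2 = some value then
    (fillB value (7 * totalCells st.1 + 2) [p] st.1, st.2 + 1)
  else st

def count_zones_alt (value : Int) (patterns : List (List (List Int))) : Int :=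
  ((positionsOf patterns).foldl (scanStep value) (patterns, 0)).2

-- ===== PRECONDITION & SPEC =====

-- Pre_ excludes value = 0 on grids that contain a 0 cell: there A's fill re-matches the very
-- cells it has just set to 0 and never returns (unbounded recursion / endless re-sweeps), and
-- B's fill loops on them the same way, so neither program returns a value on those inputs.
def Pre_count_zones (value : Int) (patterns : List (List (List Int))) : Prop :=
  value = 0 → ¬ (0 ∈ patterns.flatten.flatten)
instance (value : Int) (patterns : List (List (List Int))) : Decidable (Pre_count_zones value patterns) := by
  unfold Pre_count_zones; infer_instance

def pvWitness_count_zones : Int × List (List (List Int)) :=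
  (1, [[[1, 0], [0, 1]], [[1, 1], [0, 0]]])

def Spec_count_zones (value : Int) (patterns : List (List (List Int))) (out : Int) : Prop :=
  out = count_zones_alt value patterns
instance (value : Int) (patterns : List (List (List Int))) (out : Int) : Decidable (Spec_count_zones value patterns out) := by
  unfold Spec_count_zones; infer_instance

-- ===== CLAIM (what is proved, stated in full; the proofs are below) =====
def Claim_equal_count_zones : Prop := ∀ (value : Int) (patterns : List (List (List Int))), Dom_count_zones value patterns → Pre_count_zones value patterns → Spec_count_zones value patterns (count_zones value patterns)

-- ===== LEMMAS AND PROOFS =====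

-- `p` matches: the cell at `p` holds `value`
def pmv (v : Int) (g : List (List (List Int))) (p : Int × Int × Int) : Prop :=
  cellAt g p.1 p.2.1 p.2.2 = some v

def nbrs (p : Int × Int × Int) : List (Int × Int × Int) :=
  [(p.1+1, p.2.1, p.2.2), (p.1-1, p.2.1, p.2.2),
   (p.1, p.2.1+1, p.2.2), (p.1, p.2.1-1, p.2.2),
   (p.1, p.2.1, p.2.2+1), (p.1, p.2.1, p.2.2-1)]

def stepR (v : Int) (g : List (List (List Int))) (p q : Int × Int × Int) : Prop :=
  q ∈ nbrs p ∧ pmv v g p ∧ pmv v g q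

def reach (v : Int) (g : List (List (List Int))) : Int × Int × Int → Int × Int × Int → Prop :=
  Relation.ReflTransGen (stepR v g)

-- the connected zone seeded at p (empty unless p matches)
def inC (v : Int) (g : List (List (List Int))) (p c : Int × Int × Int) : Prop :=
  pmv v g p ∧ reach v g p c

def covered (v : Int) (g : List (List (List Int))) (s : List (Int × Int × Int))
    (c : Int × Int × Int) : Prop := ∃ p ∈ s, inC v g p c

def shape3 (g : List (List (List Int))) : List (List Nat) :=
  g.map fun layer => layer.map List.length

def look (g : List (List (List Int))) (p : Int × Int × Int) : Option Int :=
  cellAt g p.1 p.2.1 p.2.2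

-- g' is g with exactly the cells in C overwritten by 0
def erasedTo (g g' : List (List (List Int))) (C : Int × Int × Int → Prop) : Prop :=
  shape3 g' = shape3 g ∧ ∀ c, (C c → look g' c = some 0) ∧ (¬ C c → look g' c = look g c)

def mcount (v : Int) (g : List (List (List Int))) : Nat :=
  (positionsOf g).countP fun p => look g p == some v

-- ---------- infrastructure ----------

theorem getq_lt {α : Type} (l : List α) (i : Nat) (a : α) (h : l[i]? = some a) :
    i < l.length := by
  by_contra hx
  rw [List.getElem?_eq_none (by omega)] at h
  cases h

theorem getq_val {α : Type} (l : List α) (i : Nat) (a : α) (h : l[i]? = some a)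
    (hlt : i < l.length) : l[i] = a := by
  rw [List.getElem?_eq_getElem hlt] at h
  exact Option.some_inj.mp h

theorem getD_of_lt {α : Type} (l : List α) (d : α) (i : Nat) (h : i < l.length) :
    l.getD i d = l[i] := by
  rw [List.getD_eq_getElem?_getD, List.getElem?_eq_getElem h]
  rfl

theorem getD_of_ge {α : Type} (l : List α) (d : α) (i : Nat) (h : l.length ≤ i) :
    l.getD i d = d := by
  rw [List.getD_eq_getElem?_getD, List.getElem?_eq_none h]
  rfl

theorem rowAt_eq (g : List (List (List Int))) (z j : Nat) (hz : z < g.length)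
    (hj : j < g[z].length) : rowAt g z j = g[z][j] := by
  rw [rowAt, getD_of_lt g [] z hz, getD_of_lt _ [] j hj]

theorem getq_modify {α : Type} (l : List α) (i j : Nat) (f : α → α) :
    (l.modify i f)[j]? = if i = j then l[j]?.map f else l[j]? := by
  rw [List.getElem?_modify]
  cases l[j]? with
  | none => split <;> rfl
  | some a => split <;> simp_all

theorem look_nat (g : List (List (List Int))) (i j z : Nat) :
    look g ((i : Int), (j : Int), (z : Int))
      = g[z]?.bind fun layer => layer[j]?.bind fun row => row[i]? := by
  simp [look, cellAt]

theorem look_elim (g : List (List (List Int))) (p : Int × Int × Int) (a : Int)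
    (h : look g p = some a) :
    ∃ i j z : Nat, p = ((i : Int), (j : Int), (z : Int)) ∧ z < g.length ∧
      j < (g.getD z []).length ∧ i < (rowAt g z j).length ∧ (rowAt g z j)[i]? = some a := by
  unfold look cellAt at h
  by_cases hg : 0 ≤ p.1 ∧ 0 ≤ p.2.1 ∧ 0 ≤ p.2.2
  · rw [if_pos hg] at h
    obtain ⟨layer, hlayer, h2⟩ := Option.bind_eq_some_iff.mp h
    obtain ⟨row, hrow, h3⟩ := Option.bind_eq_some_iff.mp h2
    have hz := getq_lt _ _ _ hlayer
    have hlayv : g[p.2.2.toNat] = layer := getq_val _ _ _ hlayer hz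
    have hj := getq_lt _ _ _ hrow
    have hgd : g.getD p.2.2.toNat [] = layer := by rw [getD_of_lt g [] _ hz, hlayv]
    have hj' : p.2.1.toNat < (g.getD p.2.2.toNat []).length := by rw [hgd]; exact hj
    have hrowv : layer[p.2.1.toNat] = row := getq_val _ _ _ hrow hj
    have hrowAt : rowAt g p.2.2.toNat p.2.1.toNat = row := by
      rw [rowAt, hgd, getD_of_lt layer [] _ hj, hrowv]
    have hi := getq_lt _ _ _ h3
    refine ⟨p.1.toNat, p.2.1.toNat, p.2.2.toNat, ?_, hz, hj',
      by rw [hrowAt]; exact hi, by rw [hrowAt]; exact h3⟩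
    obtain ⟨a1, a2, a3⟩ := p
    simp only [Prod.mk.injEq]
    exact ⟨(Int.toNat_of_nonneg hg.1).symm, (Int.toNat_of_nonneg hg.2.1).symm,
      (Int.toNat_of_nonneg hg.2.2).symm⟩
  · rw [if_neg hg] at h
    cases h

theorem look_intro (g : List (List (List Int))) (i j z : Nat) (hz : z < g.length)
    (hj : j < (g.getD z []).length) :
    look g ((i : Int), (j : Int), (z : Int)) = (rowAt g z j)[i]? := by
  have hj2 : j < g[z].length := by rw [getD_of_lt g [] z hz] at hj; exact hj
  rw [look_nat, List.getElem?_eq_getElem hz, Option.bind_some,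
    List.getElem?_eq_getElem hj2, Option.bind_some, rowAt_eq g z j hz hj2]

theorem ext3 (g g' : List (List (List Int))) (hs : shape3 g = shape3 g')
    (h : ∀ p, look g p = look g' p) : g = g' := by
  have hlen : g.length = g'.length := by
    have := congrArg List.length hs; simpa [shape3] using this
  apply List.ext_getElem hlen
  intro z hz hz'
  have hlay : (g[z].map List.length) = (g'[z].map List.length) := by
    have h1 : (shape3 g)[z]? = (shape3 g')[z]? := by rw [hs]
    simpa [shape3, List.getElem?_eq_getElem hz,
      List.getElem?_eq_getElem hz'] using h1
  have hlaylen : g[z].length = g'[z].length := by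
    have := congrArg List.length hlay; simpa using this
  apply List.ext_getElem hlaylen
  intro j hj hj'
  have hrowlen : g[z][j].length = g'[z][j].length := by
    have h1 : (g[z].map List.length)[j]? = (g'[z].map List.length)[j]? := by rw [hlay]
    simpa [List.getElem?_eq_getElem hj, List.getElem?_eq_getElem hj'] using h1
  apply List.ext_getElem hrowlen
  intro i hi hi'
  have e1 := look_intro g i j z hz (by rw [getD_of_lt g [] z hz]; exact hj)
  have e2 := look_intro g' i j z hz' (by rw [getD_of_lt g' [] z hz']; exact hj')
  have hx := h ((i : Int), (j : Int), (z : Int))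
  rw [e1, e2, rowAt_eq g z j hz hj, rowAt_eq g' z j hz' hj',
    List.getElem?_eq_getElem hi, List.getElem?_eq_getElem hi'] at hx
  exact Option.some_inj.mp hx

theorem shape3_set0 (g : List (List (List Int))) (i j z : Int) :
    shape3 (set0 g i j z) = shape3 g := by
  unfold shape3 set0
  apply List.ext_getElem?
  intro n
  rw [List.getElem?_map, List.getElem?_map, getq_modify]
  by_cases hz : z.toNat = n
  · rw [if_pos hz]
    cases hgn : g[n]? with
    | none => rfl
    | some layer =>
      simp only [Option.map_some, Option.some_inj]
      apply List.ext_getElem?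
      intro m
      rw [List.getElem?_map, List.getElem?_map, getq_modify]
      by_cases hj : j.toNat = m
      · rw [if_pos hj]
        cases layer[m]? with
        | none => rfl
        | some row => simp [List.length_set]
      · rw [if_neg hj]
  · rw [if_neg hz]

theorem look_set0 (g : List (List (List Int))) (p : Int × Int × Int) (a : Int)
    (hp : look g p = some a) (c : Int × Int × Int) :
    look (set0 g p.1 p.2.1 p.2.2) c = if c = p then some 0 else look g c := by
  obtain ⟨i, j, z, rfl, hz, hj, hi, hrow⟩ := look_elim g p a hp
  have hj2 : j < g[z].length := by rw [getD_of_lt g [] z hz] at hj; exact hj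
  have hi2 : i < g[z][j].length := by rw [rowAt_eq g z j hz hj2] at hi; exact hi
  have hset : set0 g ((i:Int),(j:Int),(z:Int)).1 ((i:Int),(j:Int),(z:Int)).2.1
      ((i:Int),(j:Int),(z:Int)).2.2
      = g.modify z (fun L => L.modify j (fun r => r.set i 0)) := by
    simp [set0]
  rw [hset]
  by_cases hgc : 0 ≤ c.1 ∧ 0 ≤ c.2.1 ∧ 0 ≤ c.2.2
  · obtain ⟨c1, c2, c3⟩ := c
    simp only at hgc
    obtain ⟨ci, rfl⟩ : ∃ n : Nat, c1 = (n : Int) := ⟨c1.toNat, (Int.toNat_of_nonneg hgc.1).symm⟩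
    obtain ⟨cj, rfl⟩ : ∃ n : Nat, c2 = (n : Int) := ⟨c2.toNat, (Int.toNat_of_nonneg hgc.2.1).symm⟩
    obtain ⟨cz, rfl⟩ : ∃ n : Nat, c3 = (n : Int) := ⟨c3.toNat, (Int.toNat_of_nonneg hgc.2.2).symm⟩
    have heqiff : ((((ci:Int),(cj:Int),(cz:Int)) : Int × Int × Int)
        = (((i:Int),(j:Int),(z:Int)) : Int × Int × Int)) ↔ (ci = i ∧ cj = j ∧ cz = z) := by
      simp [Prod.ext_iff]
    rw [look_nat, look_nat, getq_modify]
    by_cases h1 : z = cz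
    · subst h1
      rw [if_pos rfl, List.getElem?_eq_getElem hz]
      simp only [Option.map_some, Option.bind_some]
      rw [getq_modify]
      by_cases h2 : j = cj
      · subst h2
        rw [if_pos rfl, List.getElem?_eq_getElem hj2]
        simp only [Option.map_some, Option.bind_some]
        rw [List.getElem?_set]
        by_cases h3 : i = ci
        · subst h3
          rw [if_pos rfl, if_pos hi2, if_pos (heqiff.mpr ⟨rfl, rfl, rfl⟩)]
        · rw [if_neg h3, if_neg (by rw [heqiff]; rintro ⟨hh, -, -⟩; exact h3 hh.symm)]
      · rw [if_neg h2, if_neg (by rw [heqiff]; rintro ⟨-, hh, -⟩; exact h2 hh.symm)]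
    · rw [if_neg h1, if_neg (by rw [heqiff]; rintro ⟨-, -, hh⟩; exact h1 hh.symm)]
  · have hc1 : look (g.modify z fun L => L.modify j fun r => r.set i 0) c = none := by
      unfold look cellAt; rw [if_neg hgc]
    have hc2 : look g c = none := by unfold look cellAt; rw [if_neg hgc]
    have hcp : c ≠ ((i:Int),(j:Int),(z:Int)) := by
      rintro rfl
      exact hgc ⟨Int.natCast_nonneg _, Int.natCast_nonneg _, Int.natCast_nonneg _⟩
    rw [hc1, if_neg hcp, hc2]

theorem look_set0_self (g : List (List (List Int))) (p : Int × Int × Int) (a : Int)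
    (h : look g p = some a) : look (set0 g p.1 p.2.1 p.2.2) p = some 0 := by
  rw [look_set0 g p a h p, if_pos rfl]

theorem look_set0_ne (g : List (List (List Int))) (p c : Int × Int × Int) (a : Int)
    (ha : look g p = some a) (hne : c ≠ p) :
    look (set0 g p.1 p.2.1 p.2.2) c = look g c := by
  rw [look_set0 g p a ha c, if_neg hne]

theorem mem_positionsOf (g : List (List (List Int))) (p : Int × Int × Int) (a : Int)
    (h : look g p = some a) : p ∈ positionsOf g := by
  obtain ⟨i, j, z, rfl, hz, hj, hi, -⟩ := look_elim g p a h
  unfold positionsOf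
  refine List.mem_flatMap.mpr ⟨z, List.mem_range.mpr hz, ?_⟩
  refine List.mem_flatMap.mpr ⟨j, List.mem_range.mpr hj, ?_⟩
  refine List.mem_map.mpr ⟨(i : Int), ?_, rfl⟩
  simpa using hi

theorem shape3_lens (g g' : List (List (List Int))) (hs : shape3 g = shape3 g') :
    g.length = g'.length ∧ (∀ z, (g.getD z []).length = (g'.getD z []).length) ∧
      (∀ z j, (rowAt g z j).length = (rowAt g' z j).length) := by
  have hlen : g.length = g'.length := by
    have := congrArg List.length hs; simpa [shape3] using this
  have hlay : ∀ z, (hz : z < g.length) → (hz' : z < g'.length) →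
      g[z].map List.length = g'[z].map List.length := by
    intro z hz hz'
    have h1 : (shape3 g)[z]? = (shape3 g')[z]? := by rw [hs]
    simpa [shape3, List.getElem?_eq_getElem hz, List.getElem?_eq_getElem hz'] using h1
  refine ⟨hlen, ?_, ?_⟩
  · intro z
    by_cases hz : z < g.length
    · have hz' : z < g'.length := hlen ▸ hz
      rw [getD_of_lt g [] z hz, getD_of_lt g' [] z hz']
      have := congrArg List.length (hlay z hz hz')
      simpa using this
    · rw [getD_of_ge g [] z (by omega), getD_of_ge g' [] z (by omega)]
  · intro z j
    by_cases hz : z < g.length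
    · have hz' : z < g'.length := hlen ▸ hz
      have h1 := hlay z hz hz'
      have hll : g[z].length = g'[z].length := by
        have := congrArg List.length h1; simpa using this
      by_cases hj : j < g[z].length
      · have hj' : j < g'[z].length := by omega
        have h2 : (g[z].map List.length)[j]? = (g'[z].map List.length)[j]? := by rw [h1]
        rw [List.getElem?_map, List.getElem?_map, List.getElem?_eq_getElem hj,
          List.getElem?_eq_getElem hj'] at h2
        simp only [Option.map_some, Option.some_inj] at h2
        rw [rowAt_eq g z j hz hj, rowAt_eq g' z j hz' hj']
        exact h2
      · have hj' : ¬ j < g'[z].length := by omega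
        rw [rowAt, rowAt, getD_of_lt g [] z hz, getD_of_lt g' [] z hz',
          getD_of_ge _ [] j (by omega), getD_of_ge _ [] j (by omega)]
    · have hz' : ¬ z < g'.length := by omega
      rw [rowAt, rowAt, getD_of_ge g [] z (by omega), getD_of_ge g' [] z (by omega)]

theorem positionsOf_shape (g g' : List (List (List Int))) (hs : shape3 g = shape3 g') :
    positionsOf g = positionsOf g' := by
  obtain ⟨h1, h2, h3⟩ := shape3_lens g g' hs
  unfold positionsOf
  rw [h1]
  apply List.flatMap_congr
  intro z _
  rw [h2 z]
  apply List.flatMap_congr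
  intro j _
  rw [h3 z j]

theorem range_map_getD {α β : Type} (l : List α) (d : α) (G : α → β) :
    (List.range l.length).map (fun z => G (l.getD z d)) = l.map G := by
  induction l with
  | nil => rfl
  | cons a t ih =>
    rw [List.length_cons, List.range_succ_eq_map, List.map_cons, List.map_map]
    simp only [List.getD_cons_zero, Function.comp_def, List.getD_cons_succ]
    rw [ih, List.map_cons]

theorem positionsOf_length (g : List (List (List Int))) :
    (positionsOf g).length = totalCells g := by
  unfold positionsOf totalCells
  rw [List.length_flatMap]
  have step1 : (List.map (fun z => ((List.range (g.getD z []).length).flatMap fun j =>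
      (List.range (rowAt g z j).length).map fun i => ((i:Int),(j:Int),(z:Int))).length)
      (List.range g.length))
      = (List.range g.length).map (fun z => ((g.getD z []).map List.length).sum) := by
    apply List.map_congr_left
    intro z _
    rw [List.length_flatMap]
    have hmc : (List.map (fun j => ((List.range (rowAt g z j).length).map
        fun i => ((i:Int),(j:Int),(z:Int))).length) (List.range (g.getD z []).length))
        = List.map (fun j => ((g.getD z []).getD j []).length)
          (List.range (g.getD z []).length) := by
      apply List.map_congr_left
      intro j _
      simp [rowAt]
    rw [hmc, range_map_getD (g.getD z []) [] (fun r => r.length)]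
  rw [step1, range_map_getD g [] (fun layer => (layer.map List.length).sum)]

theorem countP_mono_aux {α : Type} (l : List α) (p q : α → Bool)
    (h : ∀ a ∈ l, p a = true → q a = true) : l.countP p ≤ l.countP q := by
  induction l with
  | nil => simp
  | cons a l ih =>
    simp only [List.countP_cons]
    have hle := ih (fun x hx => h x (List.mem_cons_of_mem a hx))
    by_cases hp : p a = true
    · simp [hp, h a List.mem_cons_self hp]; omega
    · simp only [Bool.not_eq_true] at hp
      simp only [hp]
      by_cases hq : q a = true <;> simp [hq] <;> omega

theorem mcount_le_totalCells (v : Int) (g : List (List (List Int))) :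
    mcount v g ≤ totalCells g :=
  le_trans List.countP_le_length (le_of_eq (positionsOf_length g))

theorem pm_iff_countPred (v : Int) (g : List (List (List Int))) (p : Int × Int × Int) :
    (look g p == some v) = true ↔ pmv v g p := by
  simp [pmv, look]

theorem mcount_mono (v : Int) (g g' : List (List (List Int))) (hs : shape3 g' = shape3 g)
    (h : ∀ p, pmv v g' p → pmv v g p) : mcount v g' ≤ mcount v g := by
  unfold mcount
  rw [positionsOf_shape g' g hs]
  exact countP_mono_aux _ _ _ (fun a _ ha =>
    (pm_iff_countPred v g a).mpr (h a ((pm_iff_countPred v g' a).mp ha)))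

theorem mcount_lt (v : Int) (g g' : List (List (List Int))) (hs : shape3 g' = shape3 g)
    (h : ∀ p, pmv v g' p → pmv v g p) (p : Int × Int × Int) (hp : pmv v g p)
    (hp' : ¬ pmv v g' p) : mcount v g' < mcount v g := by
  unfold mcount
  rw [positionsOf_shape g' g hs]
  have hmem : p ∈ positionsOf g := mem_positionsOf g p v hp
  obtain ⟨l1, l2, hsplit⟩ := List.append_of_mem hmem
  have c1 := countP_mono_aux l1 (fun a => look g' a == some v) (fun a => look g a == some v)
    (fun a _ ha => (pm_iff_countPred v g a).mpr (h a ((pm_iff_countPred v g' a).mp ha)))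
  have c2 := countP_mono_aux l2 (fun a => look g' a == some v) (fun a => look g a == some v)
    (fun a _ ha => (pm_iff_countPred v g a).mpr (h a ((pm_iff_countPred v g' a).mp ha)))
  have e1 : (look g p == some v) = true := (pm_iff_countPred v g p).mpr hp
  have e2 : (look g' p == some v) = false := by
    rw [Bool.eq_false_iff]
    intro hx
    exact hp' ((pm_iff_countPred v g' p).mp hx)
  rw [hsplit, List.countP_append, List.countP_append, List.countP_cons, List.countP_cons, e1, e2]
  simp
  omega

theorem nbrs_symm (p q : Int × Int × Int) (h : q ∈ nbrs p) : p ∈ nbrs q := by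
  obtain ⟨p1, p2, p3⟩ := p
  simp only [nbrs, List.mem_cons, List.not_mem_nil, or_false] at h ⊢
  rcases h with h | h | h | h | h | h <;> subst h <;> simp [Prod.ext_iff]

theorem stepR_symm (v : Int) (g : List (List (List Int))) (p q : Int × Int × Int)
    (h : stepR v g p q) : stepR v g q p :=
  ⟨nbrs_symm p q h.1, h.2.2, h.2.1⟩

theorem reach_symm (v : Int) (g : List (List (List Int))) (p q : Int × Int × Int)
    (h : reach v g p q) : reach v g q p := by
  induction h with
  | refl => exact Relation.ReflTransGen.refl
  | tail h1 h2 ih => exact Relation.ReflTransGen.head (stepR_symm v g _ _ h2) ih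

theorem reach_pm (v : Int) (g : List (List (List Int))) (p q : Int × Int × Int)
    (hp : pmv v g p) (h : reach v g p q) : pmv v g q := by
  induction h with
  | refl => exact hp
  | tail h1 h2 ih => exact h2.2.2

theorem reach_mono (v : Int) (g g' : List (List (List Int)))
    (h : ∀ x, pmv v g' x → pmv v g x) (p q : Int × Int × Int)
    (hr : reach v g' p q) : reach v g p q :=
  Relation.ReflTransGen.mono (fun a b hab => ⟨hab.1, h a hab.2.1, h b hab.2.2⟩) hr

theorem pmv_set0 (v : Int) (g : List (List (List Int))) (p : Int × Int × Int)
    (hv : v ≠ 0) (hp : pmv v g p) (c : Int × Int × Int) :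
    pmv v (set0 g p.1 p.2.1 p.2.2) c ↔ pmv v g c ∧ c ≠ p := by
  have hl : look g p = some v := hp
  constructor
  · intro h
    by_cases hc : c = p
    · subst hc
      have hz := look_set0_self g c v hl
      rw [pmv, show cellAt (set0 g c.1 c.2.1 c.2.2) c.1 c.2.1 c.2.2
        = look (set0 g c.1 c.2.1 c.2.2) c from rfl, hz] at h
      exact absurd (Option.some_inj.mp h).symm hv
    · refine ⟨?_, hc⟩
      rw [pmv, show cellAt g c.1 c.2.1 c.2.2 = look g c from rfl,
        ← look_set0_ne g p c v hl hc]
      exact h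
  · rintro ⟨h, hc⟩
    rw [pmv, show cellAt (set0 g p.1 p.2.1 p.2.2) c.1 c.2.1 c.2.2
      = look (set0 g p.1 p.2.1 p.2.2) c from rfl, look_set0_ne g p c v hl hc]
    exact h

theorem reach_avoid (v : Int) (g : List (List (List Int))) (p : Int × Int × Int)
    (hv : v ≠ 0) (hp : pmv v g p) (r c : Int × Int × Int) (h : reach v g r c) :
    reach v (set0 g p.1 p.2.1 p.2.2) r c ∨ reach v g r p := by
  induction h using Relation.ReflTransGen.head_induction_on with
  | refl => exact Or.inl Relation.ReflTransGen.refl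
  | head h' hrest ih =>
    rename_i a b
    cases ih with
    | inl hl =>
      by_cases hap : a = p
      · subst hap; exact Or.inr Relation.ReflTransGen.refl
      · by_cases hbp : b = p
        · subst hbp; exact Or.inr (Relation.ReflTransGen.single h')
        · exact Or.inl (Relation.ReflTransGen.head
            ⟨h'.1, (pmv_set0 v g p hv hp a).mpr ⟨h'.2.1, hap⟩,
             (pmv_set0 v g p hv hp b).mpr ⟨h'.2.2, hbp⟩⟩ hl)
    | inr hr => exact Or.inr (Relation.ReflTransGen.head h' hr)

theorem chain_transfer (v : Int) (g : List (List (List Int))) (p : Int × Int × Int)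
    (hv : v ≠ 0) (hp : pmv v g p) :
    ∀ (l : List (Int × Int × Int)) (a : Int × Int × Int),
      List.IsChain (stepR v g) (a :: l) → a ≠ p → (∀ x ∈ l, x ≠ p) →
      List.IsChain (stepR v (set0 g p.1 p.2.1 p.2.2)) (a :: l) := by
  intro l
  induction l with
  | nil => intro a _ _ _; exact List.isChain_singleton a
  | cons b l ih =>
    intro a hch hap hl
    rw [List.isChain_cons_cons] at hch ⊢
    refine ⟨⟨hch.1.1, (pmv_set0 v g p hv hp a).mpr ⟨hch.1.2.1, hap⟩,
      (pmv_set0 v g p hv hp b).mpr ⟨hch.1.2.2, hl b List.mem_cons_self⟩⟩, ?_⟩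
    exact ih b hch.2 (hl b List.mem_cons_self) (fun x hx => hl x (List.mem_cons_of_mem b hx))

theorem comp_decompose (v : Int) (g : List (List (List Int))) (p : Int × Int × Int)
    (hv : v ≠ 0) (hp : pmv v g p) (c : Int × Int × Int) (h : reach v g p c) :
    c = p ∨ ∃ n ∈ nbrs p, inC v (set0 g p.1 p.2.1 p.2.2) n c := by
  by_cases hcp : c = p
  · exact Or.inl hcp
  right
  obtain ⟨l, hch, hlastg⟩ := List.exists_isChain_cons_of_relationReflTransGen h
  have hlast : (p :: l).getLast? = some c := by
    rw [List.getLast?_eq_some_getLast (List.cons_ne_nil _ _), hlastg]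
  clear hlastg h
  have MAIN : ∀ N (l : List (Int × Int × Int)), l.length ≤ N →
      List.IsChain (stepR v g) (p :: l) → (p :: l).getLast? = some c →
      ∃ n ∈ nbrs p, inC v (set0 g p.1 p.2.1 p.2.2) n c := by
    intro N
    induction N with
    | zero =>
      intro l hl hch hlast
      have hnil : l = [] := List.length_eq_zero_iff.mp (by omega)
      subst hnil
      rw [List.getLast?_singleton] at hlast
      exact absurd (Option.some_inj.mp hlast) (fun hx => hcp hx.symm)
    | succ N ihN =>
      intro l hl hch hlast
      cases l with
      | nil =>
        rw [List.getLast?_singleton] at hlast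
        exact absurd (Option.some_inj.mp hlast) (fun hx => hcp hx.symm)
      | cons b t =>
        by_cases hpmem : p ∈ (b :: t)
        · obtain ⟨l1, l2, hsplit⟩ := List.append_of_mem hpmem
          have hrw : p :: (b :: t) = (p :: l1) ++ (p :: l2) := by
            rw [hsplit]; simp
          rw [hrw] at hch hlast
          have hch2 : List.IsChain (stepR v g) (p :: l2) :=
            (List.isChain_append.mp hch).2.1
          cases l2 with
          | nil =>
            rw [List.getLast?_append_of_ne_nil _ (List.cons_ne_nil _ _),
              List.getLast?_singleton] at hlast
            exact absurd (Option.some_inj.mp hlast) (fun hx => hcp hx.symm)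
          | cons q l2' =>
            have hlast2 : (p :: q :: l2').getLast? = some c := by
              rw [List.getLast?_append_of_ne_nil _ (List.cons_ne_nil _ _)] at hlast
              exact hlast
            have hlen2 : (q :: l2').length ≤ N := by
              have := congrArg List.length hsplit
              simp only [List.length_cons, List.length_append] at this hl ⊢
              omega
            exact ihN (q :: l2') hlen2 hch2 hlast2
        · have hsteppb : stepR v g p b := (List.isChain_cons_cons.mp hch).1
          have hbp : b ≠ p := fun hx => hpmem (hx ▸ List.mem_cons_self)
          have hmemt : ∀ x ∈ t, x ≠ p :=
            fun x hx hxx => hpmem (List.mem_cons_of_mem _ (hxx ▸ hx))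
          have hch1 : List.IsChain (stepR v g) (b :: t) := (List.isChain_cons_cons.mp hch).2
          have hchg1 := chain_transfer v g p hv hp t b hch1 hbp hmemt
          have hlast1 : (b :: t).getLast? = some c := by
            rw [List.getLast?_cons_cons] at hlast
            exact hlast
          have hlast1' : (b :: t).getLast (List.cons_ne_nil _ _) = c := by
            rw [List.getLast?_eq_some_getLast (List.cons_ne_nil _ _)] at hlast1
            exact Option.some_inj.mp hlast1
          have hreach : reach v (set0 g p.1 p.2.1 p.2.2) b c :=
            List.relationReflTransGen_of_exists_isChain_cons t hchg1 hlast1'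
          exact ⟨b, hsteppb.1,
            (pmv_set0 v g p hv hp b).mpr ⟨hsteppb.2.2, hbp⟩, hreach⟩
  exact MAIN l.length l le_rfl hch hlast

theorem comp_recompose (v : Int) (g : List (List (List Int))) (p : Int × Int × Int)
    (hv : v ≠ 0) (hp : pmv v g p) (n c : Int × Int × Int) (hn : n ∈ nbrs p)
    (h : inC v (set0 g p.1 p.2.1 p.2.2) n c) : inC v g p c := by
  have hmono : ∀ x, pmv v (set0 g p.1 p.2.1 p.2.2) x → pmv v g x :=
    fun x hx => ((pmv_set0 v g p hv hp x).mp hx).1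
  have hpmn : pmv v g n := hmono n h.1
  refine ⟨hp, Relation.ReflTransGen.head ⟨hn, hp, hpmn⟩ ?_⟩
  exact reach_mono v g _ hmono n c h.2

theorem reach_forward (v : Int) (g : List (List (List Int))) (r c : Int × Int × Int)
    (h : reach v g r c) :
    Relation.ReflTransGen (fun a b => stepR v g a b ∧ reach v g a c ∧ reach v g b c) r c := by
  induction h using Relation.ReflTransGen.head_induction_on with
  | refl => exact Relation.ReflTransGen.refl
  | head h' hrest ih =>
    exact Relation.ReflTransGen.head
      ⟨h', Relation.ReflTransGen.head h' hrest, hrest⟩ ih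

theorem pm_of_erasedTo (v : Int) (hv : v ≠ 0) (g g2 : List (List (List Int)))
    (C : Int × Int × Int → Prop) (h : erasedTo g g2 C) (y : Int × Int × Int) :
    pmv v g2 y ↔ pmv v g y ∧ ¬ C y := by
  constructor
  · intro hy
    by_cases hc : C y
    · have hz := (h.2 y).1 hc
      rw [pmv, show cellAt g2 y.1 y.2.1 y.2.2 = look g2 y from rfl, hz] at hy
      exact absurd (Option.some_inj.mp hy).symm hv
    · have hz := (h.2 y).2 hc
      refine ⟨?_, hc⟩
      rw [pmv, show cellAt g y.1 y.2.1 y.2.2 = look g y from rfl, ← hz]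
      exact hy
  · rintro ⟨hy, hc⟩
    rw [pmv, show cellAt g2 y.1 y.2.1 y.2.2 = look g2 y from rfl, (h.2 y).2 hc]
    exact hy

theorem comp_preserve (v : Int) (g g2 : List (List (List Int))) (q : Int × Int × Int)
    (hv : v ≠ 0) (h2 : erasedTo g g2 (inC v g q)) (x : Int × Int × Int)
    (hx : ¬ inC v g q x) : ∀ c, inC v g2 x c ↔ inC v g x c := by
  intro c
  have hmono : ∀ y, pmv v g2 y → pmv v g y :=
    fun y hy => ((pm_of_erasedTo v hv g g2 _ h2 y).mp hy).1
  constructor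
  · rintro ⟨hpx, hr⟩
    exact ⟨hmono x hpx, reach_mono v g g2 hmono x c hr⟩
  · rintro ⟨hpx, hr⟩
    have hpx2 : pmv v g2 x := (pm_of_erasedTo v hv g g2 _ h2 x).mpr ⟨hpx, hx⟩
    refine ⟨hpx2, ?_⟩
    have hnc : ¬ inC v g q c := by
      rintro ⟨hpq, hqc⟩
      exact hx ⟨hpq, hqc.trans (reach_symm v g x c hr)⟩
    have hfw := reach_forward v g x c hr
    refine Relation.ReflTransGen.mono ?_ hfw
    rintro a b ⟨hab, hac, hbc⟩
    have hna : ¬ inC v g q a := by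
      rintro ⟨hpq, hqa⟩
      exact hnc ⟨hpq, hqa.trans hac⟩
    have hnb : ¬ inC v g q b := by
      rintro ⟨hpq, hqb⟩
      exact hnc ⟨hpq, hqb.trans hbc⟩
    exact ⟨hab.1, (pm_of_erasedTo v hv g g2 _ h2 a).mpr ⟨hab.2.1, hna⟩,
      (pm_of_erasedTo v hv g g2 _ h2 b).mpr ⟨hab.2.2, hnb⟩⟩

theorem erasedTo_refl (g : List (List (List Int))) (C : Int × Int × Int → Prop)
    (h : ∀ c, ¬ C c) : erasedTo g g C :=
  ⟨rfl, fun c => ⟨fun hc => absurd hc (h c), fun _ => rfl⟩⟩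

theorem erasedTo_congr (g g' : List (List (List Int))) (C C' : Int × Int × Int → Prop)
    (hC : ∀ c, C c ↔ C' c) (h : erasedTo g g' C) : erasedTo g g' C' :=
  ⟨h.1, fun c => ⟨fun hc => (h.2 c).1 ((hC c).mpr hc),
    fun hc => (h.2 c).2 (fun hx => hc ((hC c).mp hx))⟩⟩

theorem erasedTo_unique (g a b : List (List (List Int))) (C C' : Int × Int × Int → Prop)
    (hC : ∀ c, C c ↔ C' c) (ha : erasedTo g a C) (hb : erasedTo g b C') : a = b := by
  apply ext3 a b (ha.1.trans hb.1.symm)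
  intro p
  by_cases hc : C p
  · rw [(ha.2 p).1 hc, (hb.2 p).1 ((hC p).mp hc)]
  · rw [(ha.2 p).2 hc, (hb.2 p).2 (fun hx => hc ((hC p).mpr hx))]

theorem erasedTo_comp (g g2 g3 : List (List (List Int))) (C1 C2 : Int × Int × Int → Prop)
    (h1 : erasedTo g g2 C1) (h2 : erasedTo g2 g3 C2) :
    erasedTo g g3 (fun c => C1 c ∨ C2 c) := by
  refine ⟨h2.1.trans h1.1, fun c => ⟨?_, ?_⟩⟩
  · rintro (hc | hc)
    · by_cases hc2 : C2 c
      · exact (h2.2 c).1 hc2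
      · rw [(h2.2 c).2 hc2]; exact (h1.2 c).1 hc
    · exact (h2.2 c).1 hc
  · intro hc
    rw [(h2.2 c).2 (fun hx => hc (Or.inr hx)), (h1.2 c).2 (fun hx => hc (Or.inl hx))]

-- ---------- unfolding helpers for the ports ----------

theorem fillB_pos (v : Int) (fuel : Nat) (x y w : Int) (s : List (Int × Int × Int))
    (g : List (List (List Int))) (h : cellAt g x y w = some v) :
    fillB v (fuel+1) ((x, y, w) :: s) g = fillB v fuel
      ((x, y, w-1) :: (x, y, w+1) :: (x, y-1, w) :: (x, y+1, w) :: (x-1, y, w) :: (x+1, y, w) :: s)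
      (set0 g x y w) := by
  rw [fillB, if_pos h]

theorem fillB_neg (v : Int) (fuel : Nat) (x y w : Int) (s : List (Int × Int × Int))
    (g : List (List (List Int))) (h : ¬ cellAt g x y w = some v) :
    fillB v (fuel+1) ((x, y, w) :: s) g = fillB v fuel s g := by
  rw [fillB, if_neg h]

theorem fillA_neg (v : Int) (fuel : Nat) (i j z : Int) (g : List (List (List Int)))
    (h : i < 0 ∨ j < 0 ∨ z < 0) : fillA v (fuel+1) i j z g = g := by
  rw [fillA, if_pos h]

theorem fillA_none (v : Int) (fuel : Nat) (i j z : Int) (g : List (List (List Int)))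
    (h1 : ¬ (i < 0 ∨ j < 0 ∨ z < 0)) (h2 : cellAt g i j z = none) :
    fillA v (fuel+1) i j z g = g := by
  rw [fillA, if_neg h1]
  simp only [h2]

theorem fillA_skip (v : Int) (fuel : Nat) (i j z : Int) (g : List (List (List Int))) (cell : Int)
    (h1 : ¬ (i < 0 ∨ j < 0 ∨ z < 0)) (h2 : cellAt g i j z = some cell) (h3 : ¬ cell = v) :
    fillA v (fuel+1) i j z g = g := by
  rw [fillA, if_neg h1]
  simp only [h2]
  rw [if_neg h3]

theorem fillA_fill (v : Int) (fuel : Nat) (i j z : Int) (g : List (List (List Int)))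
    (h1 : ¬ (i < 0 ∨ j < 0 ∨ z < 0)) (h2 : cellAt g i j z = some v) :
    fillA v (fuel+1) i j z g
      = (nbrs (i, j, z)).foldl (fun h q => fillA v fuel q.1 q.2.1 q.2.2 h) (set0 g i j z) := by
  rw [fillA, if_neg h1]
  simp only [h2, if_true, nbrs, List.foldl_cons, List.foldl_nil]

theorem sweepRow_none (v : Int) (g : List (List (List Int))) (c : Int) (f : Bool)
    (zj : Nat × Nat) (h : (rowAt g zj.1 zj.2).findIdx? (· = v) = none) :
    sweepRow v (g, c, f) zj = (g, c, f) := by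
  have h' : (rowAt (g, c, f).1 zj.1 zj.2).findIdx? (· = v) = none := h
  unfold sweepRow
  rw [h']

theorem sweepRow_some (v : Int) (g : List (List (List Int))) (c : Int) (f : Bool)
    (zj : Nat × Nat) (i : Nat) (h : (rowAt g zj.1 zj.2).findIdx? (· = v) = some i) :
    sweepRow v (g, c, f) zj
      = (fillA v (totalCells g + 1) (i : Int) (zj.2 : Int) (zj.1 : Int) g, c + 1, true) := by
  have h' : (rowAt (g, c, f).1 zj.1 zj.2).findIdx? (· = v) = some i := h
  unfold sweepRow
  rw [h']

theorem scanStep_neg (v : Int) (g : List (List (List Int))) (c : Int) (p : Int × Int × Int)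
    (h : ¬ cellAt g p.1 p.2.1 p.2.2 = some v) : scanStep v (g, c) p = (g, c) := by
  have h' : ¬ cellAt (g, c).1 p.1 p.2.1 p.2.2 = some v := h
  unfold scanStep
  rw [if_neg h']

theorem loopA_succ (v : Int) (fuel : Nat) (g : List (List (List Int))) (c : Int)
    (g' : List (List (List Int))) (dc : Int) (found : Bool)
    (h : (pairsOf g).foldl (sweepRow v) (g, 0, false) = (g', dc, found)) :
    loopA v (fuel+1) g c = if found then loopA v fuel g' (c + dc) else c := by
  rw [loopA, h]

-- ---------- the two fills erase exactly the covered zones ----------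

theorem fillB_char (v : Int) (hv : v ≠ 0) :
    ∀ (fuel : Nat) (s : List (Int × Int × Int)) (g : List (List (List Int))),
      7 * mcount v g + s.length < fuel →
      erasedTo g (fillB v fuel s g) (covered v g s) := by
  intro fuel
  induction fuel with
  | zero => intro s g h; omega
  | succ fuel ih =>
    intro s g hfuel
    match s with
    | [] =>
      exact erasedTo_refl g _ (by rintro c ⟨p, hp, -⟩; exact absurd hp List.not_mem_nil)
    | (x, y, w) :: s =>
      set p : Int × Int × Int := (x, y, w) with hpdef
      by_cases hc : cellAt g x y w = some v
      · have hpm : pmv v g p := hc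
        rw [fillB_pos v fuel x y w s g hc]
        set g1 := set0 g x y w with hg1
        have hg1e : g1 = set0 g p.1 p.2.1 p.2.2 := rfl
        set pushed := ((x, y, w-1) :: (x, y, w+1) :: (x, y-1, w) :: (x, y+1, w) :: (x-1, y, w) :: (x+1, y, w) :: s) with hpushdef
        have hmem : ∀ q, q ∈ pushed ↔ q ∈ nbrs p ∨ q ∈ s := by
          intro q; simp [hpushdef, nbrs, hpdef]; tauto
        have hmono1 : ∀ c, pmv v g1 c → pmv v g c := by
          intro c hc1
          rw [hg1e] at hc1
          exact ((pmv_set0 v g p hv hpm c).mp hc1).1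
        have hmlt : mcount v g1 < mcount v g := by
          apply mcount_lt v g g1
          · rw [hg1e]; exact shape3_set0 g p.1 p.2.1 p.2.2
          · exact hmono1
          · exact hpm
          · rw [hg1e]; intro hx
            exact absurd ((pmv_set0 v g p hv hpm p).mp hx).2 (by simp)
        have harith : 7 * mcount v g1 + pushed.length < fuel := by
          have hpl : pushed.length = s.length + 6 := by simp [hpushdef]
          simp only [List.length_cons] at hfuel
          omega
        have IH := ih pushed g1 harith
        have hshape : shape3 (fillB v fuel pushed g1) = shape3 g := by
          rw [IH.1, hg1e]; exact shape3_set0 g p.1 p.2.1 p.2.2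
        have hPzero : look (fillB v fuel pushed g1) p = some 0 := by
          have hnotcov : ¬ covered v g1 pushed p := by
            rintro ⟨r, -, hr⟩
            have hpmp := reach_pm v g1 r p hr.1 hr.2
            rw [hg1e] at hpmp
            exact absurd ((pmv_set0 v g p hv hpm p).mp hpmp).2 (by simp)
          rw [(IH.2 p).2 hnotcov, hg1e]
          exact look_set0_self g p v hpm
        have hcase : ∀ c, inC v g p c → look (fillB v fuel pushed g1) c = some 0 := by
          intro c hcin
          rcases comp_decompose v g p hv hpm c hcin.2 with hcp | ⟨n, hn, hnc⟩
          · subst hcp; exact hPzero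
          · exact (IH.2 c).1 ⟨n, (hmem n).mpr (Or.inl hn), by rw [hg1e]; exact hnc⟩
        refine ⟨hshape, fun c => ⟨?_, ?_⟩⟩
        · rintro ⟨r, hrmem, hrin⟩
          rcases List.mem_cons.mp hrmem with hrp | hrs
          · subst hrp; exact hcase c hrin
          · by_cases hrpe : r = p
            · subst hrpe; exact hcase c hrin
            · have hpmr1 : pmv v g1 r := by
                rw [hg1e]; exact (pmv_set0 v g p hv hpm r).mpr ⟨hrin.1, hrpe⟩
              rcases reach_avoid v g p hv hpm r c hrin.2 with hl | hr
              · exact (IH.2 c).1 ⟨r, (hmem r).mpr (Or.inr hrs), hpmr1, by rw [← hg1e] at hl; exact hl⟩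
              · exact hcase c ⟨hpm, (reach_symm v g r p hr).trans hrin.2⟩
        · intro hnc
          have hcnp : c ≠ p := by
            intro hx
            exact hnc ⟨p, List.mem_cons_self, hpm, by rw [hx]; exact Relation.ReflTransGen.refl⟩
          have hnotcov : ¬ covered v g1 pushed c := by
            rintro ⟨r, hrmem, hrin⟩
            rcases (hmem r).mp hrmem with hrn | hrs
            · exact hnc ⟨p, List.mem_cons_self,
                comp_recompose v g p hv hpm r c hrn (by rw [← hg1e]; exact hrin)⟩
            · exact hnc ⟨r, List.mem_cons_of_mem _ hrs, hmono1 r hrin.1,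
                reach_mono v g g1 hmono1 r c hrin.2⟩
          rw [(IH.2 c).2 hnotcov, hg1e, look_set0_ne g p c v hpm hcnp]
      · rw [fillB_neg v fuel x y w s g hc]
        have harith : 7 * mcount v g + s.length < fuel := by
          simp only [List.length_cons] at hfuel; omega
        have IH := ih s g harith
        refine ⟨IH.1, fun c => ⟨?_, ?_⟩⟩
        · rintro ⟨r, hrmem, hrin⟩
          rcases List.mem_cons.mp hrmem with hrp | hrs
          · subst hrp; exact absurd hrin.1 hc
          · exact (IH.2 c).1 ⟨r, hrs, hrin⟩
        · intro hncov
          apply (IH.2 c).2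
          rintro ⟨r, hrs, hrin⟩
          exact hncov ⟨r, List.mem_cons_of_mem _ hrs, hrin⟩

theorem chainA (v : Int) (hv : v ≠ 0) (fuel : Nat)
    (IH : ∀ (g : List (List (List Int))) (i j z : Int), mcount v g < fuel →
      erasedTo g (fillA v fuel i j z g) (inC v g (i, j, z))) :
    ∀ (l : List (Int × Int × Int)) (g : List (List (List Int))), mcount v g < fuel →
      erasedTo g (l.foldl (fun h q => fillA v fuel q.1 q.2.1 q.2.2 h) g) (covered v g l) := by
  intro l
  induction l with
  | nil =>
    intro g hg
    exact erasedTo_refl g _ (by rintro c ⟨r, hr, -⟩; exact absurd hr List.not_mem_nil)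
  | cons q l ihl =>
    intro g hg
    simp only [List.foldl_cons]
    have h1 := IH g q.1 q.2.1 q.2.2 hg
    rw [show ((q.1, q.2.1, q.2.2) : Int × Int × Int) = q from rfl] at h1
    set gq := fillA v fuel q.1 q.2.1 q.2.2 g with hgq
    have hmono : ∀ x, pmv v gq x → pmv v g x :=
      fun x hx => ((pm_of_erasedTo v hv g gq _ h1 x).mp hx).1
    have hmle : mcount v gq ≤ mcount v g := mcount_mono v g gq h1.1 hmono
    have h2 := ihl gq (by omega)
    have hshift : ∀ c, covered v g (q :: l) c ↔ (inC v g q c ∨ covered v gq l c) := by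
      intro c
      constructor
      · rintro ⟨r, hrmem, hrin⟩
        rcases List.mem_cons.mp hrmem with hrq | hrl
        · subst hrq; exact Or.inl hrin
        · by_cases hqc : inC v g q c
          · exact Or.inl hqc
          · right
            have hnr : ¬ inC v g q r := by
              rintro ⟨hpq, hqr⟩
              exact hqc ⟨hpq, hqr.trans hrin.2⟩
            exact ⟨r, hrl, (comp_preserve v g gq q hv h1 r hnr c).mpr hrin⟩
      · rintro (hq | ⟨r, hrl, hrin⟩)
        · exact ⟨q, List.mem_cons_self, hq⟩
        · exact ⟨r, List.mem_cons_of_mem _ hrl,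
            hmono r hrin.1, reach_mono v g gq hmono r c hrin.2⟩
    refine ⟨h2.1.trans h1.1, fun c => ⟨?_, ?_⟩⟩
    · intro hcov
      rcases (hshift c).mp hcov with hq | hcov2
      · by_cases hcov2 : covered v gq l c
        · exact (h2.2 c).1 hcov2
        · rw [(h2.2 c).2 hcov2]; exact (h1.2 c).1 hq
      · exact (h2.2 c).1 hcov2
    · intro hncov
      have hn1 : ¬ inC v g q c := fun hx => hncov ((hshift c).mpr (Or.inl hx))
      have hn2 : ¬ covered v gq l c := fun hx => hncov ((hshift c).mpr (Or.inr hx))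
      rw [(h2.2 c).2 hn2, (h1.2 c).2 hn1]

theorem fillA_char (v : Int) (hv : v ≠ 0) :
    ∀ (fuel : Nat) (g : List (List (List Int))) (i j z : Int),
      mcount v g < fuel →
      erasedTo g (fillA v fuel i j z g) (inC v g (i, j, z)) := by
  intro fuel
  induction fuel with
  | zero => intro g i j z h; omega
  | succ fuel ih =>
    intro g i j z hfuel
    by_cases hneg : i < 0 ∨ j < 0 ∨ z < 0
    · rw [fillA_neg v fuel i j z g hneg]
      apply erasedTo_refl
      rintro c ⟨hpm, -⟩
      have hcond : ¬ (0 ≤ i ∧ 0 ≤ j ∧ 0 ≤ z) := by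
        rintro ⟨ha, hb, hc2⟩
        rcases hneg with hh | hh | hh <;> omega
      rw [pmv] at hpm
      simp only at hpm
      rw [cellAt, if_neg hcond] at hpm
      cases hpm
    · cases hcell : cellAt g i j z with
      | none =>
        rw [fillA_none v fuel i j z g hneg hcell]
        apply erasedTo_refl
        rintro c ⟨hpm, -⟩
        rw [pmv] at hpm
        simp only at hpm
        rw [hcell] at hpm
        cases hpm
      | some cell =>
        by_cases hev : cell = v
        · rw [hev] at hcell
          have hpm : pmv v g (i, j, z) := hcell
          rw [fillA_fill v fuel i j z g hneg hcell]
          set p : Int × Int × Int := (i, j, z) with hpdef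
          set g1 := set0 g i j z with hg1
          have hg1e : g1 = set0 g p.1 p.2.1 p.2.2 := rfl
          have hmlt : mcount v g1 < mcount v g := by
            apply mcount_lt v g g1
            · rw [hg1e]; exact shape3_set0 g p.1 p.2.1 p.2.2
            · intro c hc1
              rw [hg1e] at hc1
              exact ((pmv_set0 v g p hv hpm c).mp hc1).1
            · exact hpm
            · rw [hg1e]; intro hx
              exact absurd ((pmv_set0 v g p hv hpm p).mp hx).2 (by simp)
          have hch := chainA v hv fuel ih (nbrs p) g1 (by omega)
          have hshape : shape3 ((nbrs p).foldl (fun h q => fillA v fuel q.1 q.2.1 q.2.2 h) g1)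
              = shape3 g := by
            rw [hch.1, hg1e]; exact shape3_set0 g p.1 p.2.1 p.2.2
          have hmono1 : ∀ c, pmv v g1 c → pmv v g c := by
            intro c hc1
            rw [hg1e] at hc1
            exact ((pmv_set0 v g p hv hpm c).mp hc1).1
          have hPzero : look ((nbrs p).foldl (fun h q => fillA v fuel q.1 q.2.1 q.2.2 h) g1) p
              = some 0 := by
            have hnotcov : ¬ covered v g1 (nbrs p) p := by
              rintro ⟨r, -, hr⟩
              have hpmp := reach_pm v g1 r p hr.1 hr.2
              rw [hg1e] at hpmp
              exact absurd ((pmv_set0 v g p hv hpm p).mp hpmp).2 (by simp)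
            rw [(hch.2 p).2 hnotcov, hg1e]
            exact look_set0_self g p v hpm
          refine ⟨hshape, fun c => ⟨?_, ?_⟩⟩
          · rintro ⟨hpm', hr⟩
            rcases comp_decompose v g p hv hpm c hr with hcp | ⟨n, hn, hnc⟩
            · subst hcp; exact hPzero
            · exact (hch.2 c).1 ⟨n, hn, by rw [hg1e]; exact hnc⟩
          · intro hnc
            have hcnp : c ≠ p := by
              intro hx
              exact hnc ⟨hpm, by rw [hx]; exact Relation.ReflTransGen.refl⟩
            have hnotcov : ¬ covered v g1 (nbrs p) c := by
              rintro ⟨r, hrn, hrin⟩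
              exact hnc (comp_recompose v g p hv hpm r c hrn (by rw [← hg1e]; exact hrin))
            rw [(hch.2 c).2 hnotcov, hg1e, look_set0_ne g p c v hpm hcnp]
        · rw [fillA_skip v fuel i j z g cell hneg hcell hev]
          apply erasedTo_refl
          rintro c ⟨hpm, -⟩
          rw [pmv] at hpm
          simp only at hpm
          rw [hcell] at hpm
          exact hev (Option.some_inj.mp hpm)

-- ---------- counting zones ----------

def firstMatch (v : Int) (g : List (List (List Int))) : Option (Int × Int × Int) :=
  (positionsOf g).find? fun p => look g p == some v

-- the canonical erase of the zone of p (definitionally what B's scan performs)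
def eraseZ (v : Int) (p : Int × Int × Int) (g : List (List (List Int))) :
    List (List (List Int)) := fillB v (7 * totalCells g + 2) [p] g

def ncf (v : Int) : Nat → List (List (List Int)) → Nat
  | 0, _ => 0
  | fuel+1, g =>
    match firstMatch v g with
    | none => 0
    | some m => 1 + ncf v fuel (eraseZ v m g)

theorem ncf_succ_none (v : Int) (fuel : Nat) (g : List (List (List Int)))
    (h : firstMatch v g = none) : ncf v (fuel+1) g = 0 := by
  rw [ncf]
  simp only [h]

theorem ncf_succ_some (v : Int) (fuel : Nat) (g : List (List (List Int)))
    (m : Int × Int × Int) (h : firstMatch v g = some m) :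
    ncf v (fuel+1) g = 1 + ncf v fuel (eraseZ v m g) := by
  rw [ncf]
  simp only [h]

theorem firstMatch_none (v : Int) (g : List (List (List Int))) :
    firstMatch v g = none ↔ ∀ p, ¬ pmv v g p := by
  unfold firstMatch
  rw [List.find?_eq_none]
  constructor
  · intro h p hp
    have hx := h p (mem_positionsOf g p v hp)
    rw [Bool.not_eq_true] at hx
    exact absurd ((pm_iff_countPred v g p).mpr hp) (by simp [hx])
  · intro h p _
    rw [Bool.not_eq_true, Bool.eq_false_iff]
    intro hx
    exact h p ((pm_iff_countPred v g p).mp hx)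

theorem firstMatch_pm (v : Int) (g : List (List (List Int))) (m : Int × Int × Int)
    (h : firstMatch v g = some m) : pmv v g m := by
  unfold firstMatch at h
  have hx := List.find?_some (p := fun p => look g p == some v) h
  exact (pm_iff_countPred v g m).mp hx

theorem find?_preserve {α : Type} (p q : α → Bool) (m : α) :
    ∀ l : List α, l.find? p = some m → q m = true → (∀ x, q x = true → p x = true) →
      l.find? q = some m := by
  intro l
  induction l with
  | nil => intro h; simp at h
  | cons a l ih =>
    intro h hm himp
    by_cases hpa : p a = true
    · rw [List.find?_cons_of_pos hpa] at h
      have hx : a = m := Option.some_inj.mp h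
      subst hx
      rw [List.find?_cons_of_pos hm]
    · rw [List.find?_cons_of_neg (by simp [hpa])] at h
      have hqa : ¬ q a = true := fun hq => hpa (himp a hq)
      rw [List.find?_cons_of_neg (by simp [hqa])]
      exact ih h hm himp

theorem firstMatch_preserve (v : Int) (g g2 : List (List (List Int)))
    (hs : shape3 g2 = shape3 g) (hmono : ∀ x, pmv v g2 x → pmv v g x)
    (m : Int × Int × Int) (h : firstMatch v g = some m) (hm : pmv v g2 m) :
    firstMatch v g2 = some m := by
  unfold firstMatch at h ⊢
  rw [positionsOf_shape g2 g hs]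
  exact find?_preserve _ _ m (positionsOf g) h ((pm_iff_countPred v g2 m).mpr hm)
    (fun x hx => (pm_iff_countPred v g x).mpr (hmono x ((pm_iff_countPred v g2 x).mp hx)))

theorem eraseZ_erasedTo (v : Int) (hv : v ≠ 0) (p : Int × Int × Int)
    (g : List (List (List Int))) : erasedTo g (eraseZ v p g) (inC v g p) := by
  have h := fillB_char v hv (7 * totalCells g + 2) [p] g
    (by have := mcount_le_totalCells v g; simp only [List.length_singleton]; omega)
  exact erasedTo_congr g _ _ _ (fun c => by
    unfold covered
    constructor
    · rintro ⟨r, hr, hin⟩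
      rw [List.mem_singleton] at hr
      subst hr; exact hin
    · intro hx; exact ⟨p, List.mem_singleton.mpr rfl, hx⟩) h

theorem eraseZ_mcount_lt (v : Int) (hv : v ≠ 0) (p : Int × Int × Int)
    (g : List (List (List Int))) (hp : pmv v g p) : mcount v (eraseZ v p g) < mcount v g := by
  have h := eraseZ_erasedTo v hv p g
  apply mcount_lt v g _ h.1
  · exact fun x hx => ((pm_of_erasedTo v hv g _ _ h x).mp hx).1
  · exact hp
  · intro hx
    exact ((pm_of_erasedTo v hv g _ _ h p).mp hx).2 ⟨hp, Relation.ReflTransGen.refl⟩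

theorem eraseZ_congr (v : Int) (hv : v ≠ 0) (p q : Int × Int × Int)
    (g : List (List (List Int))) (h : ∀ c, inC v g p c ↔ inC v g q c) :
    eraseZ v p g = eraseZ v q g :=
  erasedTo_unique g _ _ _ _ h (eraseZ_erasedTo v hv p g) (eraseZ_erasedTo v hv q g)

theorem ncf_irrel (v : Int) (hv : v ≠ 0) :
    ∀ (f1 f2 : Nat) (g : List (List (List Int))), mcount v g < f1 → mcount v g < f2 →
      ncf v f1 g = ncf v f2 g := by
  intro f1
  induction f1 with
  | zero => intro f2 g h _; omega
  | succ f1 ih =>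
    intro f2 g h1 h2
    cases f2 with
    | zero => omega
    | succ f2 =>
      cases hfm : firstMatch v g with
      | none => rw [ncf_succ_none v f1 g hfm, ncf_succ_none v f2 g hfm]
      | some m =>
        have hpm := firstMatch_pm v g m hfm
        have hlt := eraseZ_mcount_lt v hv m g hpm
        rw [ncf_succ_some v f1 g m hfm, ncf_succ_some v f2 g m hfm,
          ih f2 (eraseZ v m g) (by omega) (by omega)]

theorem ncf_key (v : Int) (hv : v ≠ 0) :
    ∀ (fuel : Nat) (g : List (List (List Int))) (q : Int × Int × Int),
      mcount v g < fuel → pmv v g q →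
      ncf v fuel g = ncf v fuel (eraseZ v q g) + 1 := by
  intro fuel
  induction fuel with
  | zero => intro g q h _; omega
  | succ fuel ih =>
    intro g q hfuel hq
    cases hfm : firstMatch v g with
    | none => exact absurd hq ((firstMatch_none v g).mp hfm q)
    | some m =>
      have hpmm := firstMatch_pm v g m hfm
      have hltm := eraseZ_mcount_lt v hv m g hpmm
      have hltq := eraseZ_mcount_lt v hv q g hq
      by_cases hconn : reach v g q m
      · have hcongr : ∀ c, inC v g q c ↔ inC v g m c := by
          intro c
          constructor
          · rintro ⟨-, hr⟩
            exact ⟨hpmm, (reach_symm v g q m hconn).trans hr⟩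
          · rintro ⟨-, hr⟩
            exact ⟨hq, hconn.trans hr⟩
        rw [show eraseZ v q g = eraseZ v m g from eraseZ_congr v hv q m g hcongr]
        rw [ncf_succ_some v fuel g m hfm,
          ncf_irrel v hv (fuel+1) fuel (eraseZ v m g) (by omega) (by omega)]
        omega
      · have hqm : ¬ inC v g q m := by rintro ⟨-, hr⟩; exact hconn hr
        have hmq : ¬ inC v g m q := by
          rintro ⟨-, hr⟩; exact hconn (reach_symm v g m q hr)
        have hEq := eraseZ_erasedTo v hv q g
        have hEm := eraseZ_erasedTo v hv m g
        have hpm_q_in_m : pmv v (eraseZ v m g) q :=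
          (pm_of_erasedTo v hv g _ _ hEm q).mpr ⟨hq, hmq⟩
        have hpm_m_in_q : pmv v (eraseZ v q g) m :=
          (pm_of_erasedTo v hv g _ _ hEq m).mpr ⟨hpmm, hqm⟩
        have hfmq : firstMatch v (eraseZ v q g) = some m :=
          firstMatch_preserve v g _ hEq.1
            (fun x hx => ((pm_of_erasedTo v hv g _ _ hEq x).mp hx).1) m hfm hpm_m_in_q
        have hcomm : eraseZ v m (eraseZ v q g) = eraseZ v q (eraseZ v m g) := by
          have h1 : erasedTo g (eraseZ v m (eraseZ v q g))
              (fun c => inC v g q c ∨ inC v g m c) := by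
            have e2 := eraseZ_erasedTo v hv m (eraseZ v q g)
            have e2' : erasedTo (eraseZ v q g) (eraseZ v m (eraseZ v q g)) (inC v g m) :=
              erasedTo_congr _ _ _ _ (comp_preserve v g _ q hv hEq m hqm) e2
            exact erasedTo_comp g _ _ _ _ hEq e2'
          have h2 : erasedTo g (eraseZ v q (eraseZ v m g))
              (fun c => inC v g m c ∨ inC v g q c) := by
            have e2 := eraseZ_erasedTo v hv q (eraseZ v m g)
            have e2' : erasedTo (eraseZ v m g) (eraseZ v q (eraseZ v m g)) (inC v g q) :=
              erasedTo_congr _ _ _ _ (comp_preserve v g _ m hv hEm q hmq) e2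
            exact erasedTo_comp g _ _ _ _ hEm e2'
          exact erasedTo_unique g _ _ _ _ (fun c => by tauto) h1 h2
        have hIH := ih (eraseZ v m g) q (by omega) hpm_q_in_m
        rw [ncf_succ_some v fuel g m hfm, ncf_succ_some v fuel (eraseZ v q g) m hfmq, hcomm]
        omega

-- ---------- B's scan computes the zone count ----------

theorem scanStep_posE (v : Int) (g : List (List (List Int))) (c : Int) (p : Int × Int × Int)
    (h : cellAt g p.1 p.2.1 p.2.2 = some v) :
    scanStep v (g, c) p = (eraseZ v p g, c + 1) := by
  have h' : cellAt (g, c).1 p.1 p.2.1 p.2.2 = some v := h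
  unfold scanStep eraseZ
  rw [if_pos h']

theorem scan_count (v : Int) (hv : v ≠ 0) :
    ∀ (l : List (Int × Int × Int)) (g : List (List (List Int))) (c : Int),
      (∀ x, pmv v g x → ∃ r ∈ l, inC v g x r) →
      (l.foldl (scanStep v) (g, c)).2 = c + (ncf v (mcount v g + 1) g : Int) := by
  intro l
  induction l with
  | nil =>
    intro g c hinv
    have hnone : firstMatch v g = none := by
      rw [firstMatch_none]
      intro p hp
      obtain ⟨r, hr, -⟩ := hinv p hp
      exact absurd hr List.not_mem_nil
    simp only [List.foldl_nil]
    rw [ncf_succ_none v (mcount v g) g hnone]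
    simp
  | cons p l ih =>
    intro g c hinv
    simp only [List.foldl_cons]
    by_cases hc : cellAt g p.1 p.2.1 p.2.2 = some v
    · rw [scanStep_posE v g c p hc]
      have hpm : pmv v g p := hc
      have hE := eraseZ_erasedTo v hv p g
      have hinv' : ∀ x, pmv v (eraseZ v p g) x → ∃ r ∈ l, inC v (eraseZ v p g) x r := by
        intro x hx
        have hx' := (pm_of_erasedTo v hv g _ _ hE x).mp hx
        obtain ⟨r, hrmem, hrin⟩ := hinv x hx'.1
        rcases List.mem_cons.mp hrmem with hrp | hrl
        · subst hrp
          exact absurd ⟨hpm, reach_symm v g x r hrin.2⟩ hx'.2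
        · exact ⟨r, hrl, (comp_preserve v g _ p hv hE x hx'.2 r).mpr hrin⟩
      rw [ih (eraseZ v p g) (c+1) hinv']
      have hlt := eraseZ_mcount_lt v hv p g hpm
      have hkey := ncf_key v hv (mcount v g + 1) g p (by omega) hpm
      rw [ncf_irrel v hv (mcount v (eraseZ v p g) + 1) (mcount v g + 1) (eraseZ v p g)
        (by omega) (by omega), hkey]
      push_cast
      ring
    · rw [scanStep_neg v g c p hc]
      apply ih
      intro x hx
      obtain ⟨r, hrmem, hrin⟩ := hinv x hx
      rcases List.mem_cons.mp hrmem with hrp | hrl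
      · subst hrp
        exact absurd (reach_pm v g x r hrin.1 hrin.2) hc
      · exact ⟨r, hrl, hrin⟩

-- ---------- A's sweeps compute the zone count ----------

theorem rowIdx_pm (v : Int) (g : List (List (List Int))) (z j i : Nat)
    (h : (rowAt g z j).findIdx? (· = v) = some i) :
    pmv v g ((i : Int), (j : Int), (z : Int)) := by
  obtain ⟨hlt, hp, -⟩ := List.findIdx?_eq_some_iff_getElem.mp h
  have hval : (rowAt g z j)[i] = v := by simpa using hp
  have hrow_ne : rowAt g z j ≠ [] := by
    intro hx
    rw [hx] at hlt
    simp at hlt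
  have hz : z < g.length := by
    by_contra hx
    exact hrow_ne (by rw [rowAt, getD_of_ge g [] z (by omega), List.getD_nil])
  have hj : j < (g.getD z []).length := by
    by_contra hx
    exact hrow_ne (by rw [rowAt, getD_of_ge _ [] j (by omega)])
  show look g ((i : Int), (j : Int), (z : Int)) = some v
  rw [look_intro g i j z hz hj, List.getElem?_eq_getElem hlt, hval]

theorem sweep_fill (v : Int) (hv : v ≠ 0) (g : List (List (List Int)))
    (zj : Nat × Nat) (i : Nat) (h : (rowAt g zj.1 zj.2).findIdx? (· = v) = some i) :
    pmv v g ((i : Int), (zj.2 : Int), (zj.1 : Int)) ∧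
      fillA v (totalCells g + 1) (i : Int) (zj.2 : Int) (zj.1 : Int) g
        = eraseZ v ((i : Int), (zj.2 : Int), (zj.1 : Int)) g := by
  have hpm := rowIdx_pm v g zj.1 zj.2 i h
  refine ⟨hpm, ?_⟩
  have h1 := fillA_char v hv (totalCells g + 1) g (i : Int) (zj.2 : Int) (zj.1 : Int)
    (by have := mcount_le_totalCells v g; omega)
  have h2 := eraseZ_erasedTo v hv ((i : Int), (zj.2 : Int), (zj.1 : Int)) g
  exact erasedTo_unique g _ _ _ _ (fun c => Iff.rfl) h1 h2

theorem sweep_props (v : Int) (hv : v ≠ 0) :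
    ∀ (l : List (Nat × Nat)) (g : List (List (List Int))) (c : Int) (f : Bool)
      (g' : List (List (List Int))) (c' : Int) (f' : Bool),
      l.foldl (sweepRow v) (g, c, f) = (g', c', f') →
      shape3 g' = shape3 g ∧ (∀ x, pmv v g' x → pmv v g x) ∧
      c' + (ncf v (mcount v g' + 1) g' : Int) = c + (ncf v (mcount v g + 1) g : Int) ∧
      mcount v g' ≤ mcount v g ∧
      (f = false → f' = true → mcount v g' < mcount v g) ∧
      (f' = false → g' = g ∧ c' = c ∧ f = false ∧
        ∀ zj ∈ l, (rowAt g zj.1 zj.2).findIdx? (· = v) = none) := by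
  intro l
  induction l with
  | nil =>
    intro g c f g' c' f' heq
    simp only [List.foldl_nil, Prod.mk.injEq] at heq
    obtain ⟨rfl, rfl, rfl⟩ := heq
    refine ⟨rfl, fun x h => h, rfl, le_refl _, ?_, ?_⟩
    · intro h1 h2
      rw [h1] at h2
      cases h2
    · intro hf
      exact ⟨rfl, rfl, hf, fun zj hz => absurd hz List.not_mem_nil⟩
  | cons zj l ih =>
    intro g c f g' c' f' heq
    simp only [List.foldl_cons] at heq
    cases hrow : (rowAt g zj.1 zj.2).findIdx? (· = v) with
    | none =>
      rw [sweepRow_none v g c f zj hrow] at heq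
      obtain ⟨hs, hm, hc, hle, hstrict, hfalse⟩ := ih g c f g' c' f' heq
      refine ⟨hs, hm, hc, hle, hstrict, fun hf' => ?_⟩
      obtain ⟨e1, e2, e3, e4⟩ := hfalse hf'
      refine ⟨e1, e2, e3, fun zj' hm' => ?_⟩
      rcases List.mem_cons.mp hm' with hh | hh
      · subst hh; exact hrow
      · exact e4 zj' hh
    | some i =>
      rw [sweepRow_some v g c f zj i hrow, (sweep_fill v hv g zj i hrow).2] at heq
      set p : Int × Int × Int := ((i : Int), (zj.2 : Int), (zj.1 : Int)) with hp
      have hpm := (sweep_fill v hv g zj i hrow).1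
      have hE := eraseZ_erasedTo v hv p g
      have hlt := eraseZ_mcount_lt v hv p g hpm
      obtain ⟨hs, hm, hc, hle, hstrict, hfalse⟩ := ih (eraseZ v p g) (c+1) true g' c' f' heq
      have hmono2 : ∀ x, pmv v (eraseZ v p g) x → pmv v g x :=
        fun x hx => ((pm_of_erasedTo v hv g _ _ hE x).mp hx).1
      refine ⟨hs.trans hE.1, fun x hx => hmono2 x (hm x hx), ?_, by omega,
        fun _ _ => by omega, fun hf' => ?_⟩
      · rw [hc]
        have hkey := ncf_key v hv (mcount v g + 1) g p (by omega) hpm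
        rw [ncf_irrel v hv (mcount v (eraseZ v p g) + 1) (mcount v g + 1) (eraseZ v p g)
          (by omega) (by omega), hkey]
        push_cast
        ring
      · obtain ⟨-, -, e3, -⟩ := hfalse hf'
        cases e3

theorem pairs_complete (v : Int) (g : List (List (List Int)))
    (h : ∀ zj ∈ pairsOf g, (rowAt g zj.1 zj.2).findIdx? (· = v) = none) :
    ∀ p, ¬ pmv v g p := by
  intro p hp
  obtain ⟨i, j, z, rfl, hz, hj, hi, hrow⟩ := look_elim g p v hp
  have hmem : ((z, j) : Nat × Nat) ∈ pairsOf g := by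
    unfold pairsOf
    simp only [List.mem_flatMap, List.mem_map, List.mem_range]
    exact ⟨z, hz, j, hj, rfl⟩
  have hnone := h (z, j) hmem
  rw [List.findIdx?_eq_none_iff] at hnone
  have hmem2 : v ∈ rowAt g z j := List.mem_of_getElem? hrow
  have hx := hnone v hmem2
  simp at hx

theorem loopA_count (v : Int) (hv : v ≠ 0) :
    ∀ (fuel : Nat) (g : List (List (List Int))) (c : Int), mcount v g < fuel →
      loopA v fuel g c = c + (ncf v (mcount v g + 1) g : Int) := by
  intro fuel
  induction fuel with
  | zero => intro g c h; omega
  | succ fuel ih =>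
    intro g c hfuel
    obtain ⟨⟨g', dc, found⟩, hfold⟩ :
        ∃ r, (pairsOf g).foldl (sweepRow v) (g, 0, false) = r := ⟨_, rfl⟩
    rw [loopA_succ v fuel g c g' dc found hfold]
    obtain ⟨hs, hm, hc, hle, hstrict, hfalse⟩ :=
      sweep_props v hv (pairsOf g) g 0 false g' dc found hfold
    cases found with
    | false =>
      obtain ⟨-, -, -, hrows⟩ := hfalse rfl
      have hnom := pairs_complete v g hrows
      have hfm : firstMatch v g = none := (firstMatch_none v g).mpr hnom
      rw [if_neg (by simp), ncf_succ_none v (mcount v g) g hfm]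
      simp
    | true =>
      have hmlt : mcount v g' < mcount v g := hstrict rfl rfl
      rw [if_pos rfl, ih g' (c + dc) (by omega)]
      omega

-- ---------- the degenerate value-absent case (covers value = 0 under Pre_) ----------

theorem look_mem_flatten (g : List (List (List Int))) (p : Int × Int × Int) (a : Int)
    (h : look g p = some a) : a ∈ g.flatten.flatten := by
  obtain ⟨i, j, z, rfl, hz, hj, hi, hrow⟩ := look_elim g p a h
  have hj2 : j < g[z].length := by rw [getD_of_lt g [] z hz] at hj; exact hj
  have h1 : a ∈ rowAt g z j := List.mem_of_getElem? hrow
  have h2 : rowAt g z j ∈ g.flatten := by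
    apply List.mem_flatten.mpr
    refine ⟨g[z], List.getElem_mem hz, ?_⟩
    rw [rowAt_eq g z j hz hj2]
    exact List.getElem_mem hj2
  exact List.mem_flatten.mpr ⟨rowAt g z j, h2, h1⟩

theorem rowAt_no_match (v : Int) (g : List (List (List Int))) (hv : ∀ p, ¬ pmv v g p)
    (zj : Nat × Nat) : (rowAt g zj.1 zj.2).findIdx? (· = v) = none := by
  cases h : (rowAt g zj.1 zj.2).findIdx? (· = v) with
  | none => rfl
  | some i => exact absurd (rowIdx_pm v g zj.1 zj.2 i h) (hv _)

theorem sweep_id (v : Int) (l : List (Nat × Nat)) (g : List (List (List Int))) (c : Int)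
    (f : Bool) (h : ∀ zj ∈ l, (rowAt g zj.1 zj.2).findIdx? (· = v) = none) :
    l.foldl (sweepRow v) (g, c, f) = (g, c, f) := by
  induction l with
  | nil => rfl
  | cons zj l ih =>
    simp only [List.foldl_cons]
    rw [sweepRow_none v g c f zj (h zj List.mem_cons_self)]
    exact ih (fun zj' h' => h zj' (List.mem_cons_of_mem _ h'))

theorem scan_id (v : Int) (l : List (Int × Int × Int)) (g : List (List (List Int))) (c : Int)
    (h : ∀ p, ¬ pmv v g p) : l.foldl (scanStep v) (g, c) = (g, c) := by
  induction l with
  | nil => rfl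
  | cons p l ih =>
    simp only [List.foldl_cons]
    rw [scanStep_neg v g c p (h p)]
    exact ih

-- ===== VERDICT (by name: the statement is the Claim_ definition above) =====
theorem count_zones_spec : Claim_equal_count_zones := by
  intro v g _ hpre
  unfold Spec_count_zones count_zones count_zones_alt
  by_cases hv : v = 0
  · subst hv
    have hnom : ∀ p, ¬ pmv 0 g p := by
      intro p hp
      exact hpre rfl (look_mem_flatten g p 0 hp)
    have hrow := rowAt_no_match 0 g hnom
    obtain ⟨⟨g', dc, found⟩, hfold⟩ :
        ∃ r, (pairsOf g).foldl (sweepRow 0) (g, 0, false) = r := ⟨_, rfl⟩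
    have hid : (pairsOf g).foldl (sweepRow 0) (g, 0, false) = (g, 0, false) :=
      sweep_id 0 (pairsOf g) g 0 false (fun zj _ => hrow zj)
    have hL : loopA 0 (totalCells g + 2) g 0
        = if false then loopA 0 (totalCells g + 1) g (0 + 0) else 0 :=
      loopA_succ 0 (totalCells g + 1) g 0 g 0 false hid
    rw [hL, if_neg (by simp), scan_id 0 (positionsOf g) g 0 hnom]
  · have hm := mcount_le_totalCells v g
    have h1 := loopA_count v hv (totalCells g + 2) g 0 (by omega)
    have h2 := scan_count v hv (positionsOf g) g 0
      (fun x hx => ⟨x, mem_positionsOf g x v hx, hx, Relation.ReflTransGen.refl⟩)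
    rw [h1, h2]
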